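-- pv_equiv track=rewrite | github.com/Zerovelocity275/Advent-of-Code | Advent of code/2023/Output/Day 7.py | handtype
-- ===== SOURCE A (Python) =====
-- def handtype(hand, part):
--     if part == 2:
--         joker = hand.find('J')
--         if joker > -1:
--             return max([handtype(hand[0:joker] + card + hand[joker + 1:5], 2) for card in cardstrength[:12]])
--     cards = {card:hand.count(card) for card in hand}
--     if len(cards) == 1:
--         return 6
--     if len(cards) == 2:
--         return 5 if 4 in cards.values() else 4
--     if len(cards) == 3:
--         return 3 if 3 in cards.values() else 2
--     if len(cards) == 4:
--         return 1
--     return 0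
--
-- cardstrength = ['A', 'K', 'Q', 'T', '9', '8', '7', '6', '5', '4', '3', '2', 'J']
-- ===== SOURCE B (Python) =====
-- cardstrength = ['A', 'K', 'Q', 'T', '9', '8', '7', '6', '5', '4', '3', '2', 'J']
--
-- def _classify(hand):
--     counts = {}
--     for ch in hand:
--         counts[ch] = counts.get(ch, 0) + 1
--     vals = counts.values()
--     d = len(counts)
--     if d == 0 or d >= 5:
--         return 0
--     return [0, 6, 5 if 4 in vals else 4, 3 if 3 in vals else 2, 1][d]
--
-- def handtype(hand, part):
--     if part == 2 and 'J' in hand: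
--         return max(_classify(''.join(c if ch == 'J' else ch for ch in hand))
--                    for c in cardstrength[:12])
--     return _classify(hand)
-- ===== Notes on version B (the rewrite author's own statement) =====
-- stated objective: faster
-- what changed: B counts cards in one pass (a dict built once) instead of A's per-character hand.count rescans, and resolves jokers by classifying the 12 uniform all-jokers-become-one-card substitutions instead of A's 12^k recursive enumeration of per-joker choices; Pre_ excludes part-2 hands longer than five cards that contain a joker, where A's hard-coded slice hand[joker+1:5] silently drops the cards after the fifth while resolving jokers - a truncation artefact of a 5-card-hand routine, on which B scores the whole hand.
-- outside the precondition, e.g. on handtype('JABCDE', 2): A returns 1, B returns 0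
import Mathlib
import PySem

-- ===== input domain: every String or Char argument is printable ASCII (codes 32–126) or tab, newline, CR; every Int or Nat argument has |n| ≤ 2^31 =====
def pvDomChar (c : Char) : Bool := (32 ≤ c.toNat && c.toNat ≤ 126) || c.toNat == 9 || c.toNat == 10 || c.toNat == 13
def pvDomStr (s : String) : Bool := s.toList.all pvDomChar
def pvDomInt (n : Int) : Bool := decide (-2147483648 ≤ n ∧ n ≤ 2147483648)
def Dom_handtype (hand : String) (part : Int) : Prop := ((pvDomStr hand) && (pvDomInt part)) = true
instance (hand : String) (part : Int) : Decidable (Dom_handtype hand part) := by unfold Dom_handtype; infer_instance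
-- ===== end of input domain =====

-- B counts cards in one pass and resolves jokers by the 12 uniform substitutions instead of
-- A's per-character rescans and 12^k recursive enumeration (objective: faster).

-- ===== PORT A =====
-- cardstrength = ['A','K','Q','T','9','8','7','6','5','4','3','2','J'] ; Python's one-char
-- strings are modelled as Chars (iterating a Python str yields its characters).
def cardstrength : List Char := ['A', 'K', 'Q', 'T', '9', '8', '7', '6', '5', '4', '3', '2', 'J']

-- helpers for the termination proof of handtypeA (cited in its decreasing_by)
lemma pv_singleton_prefix (m : List Char) (a : Char) : [a] <+: m ↔ m.head? = some a := by
  constructor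
  · rintro ⟨t, rfl⟩; rfl
  · intro h
    cases m with
    | nil => simp at h
    | cons b t =>
      simp only [List.head?_cons, Option.some.injEq] at h
      exact ⟨t, by simp [h]⟩

lemma pv_find_decomp (l : List Char) {j : Int} (h0 : 0 ≤ j)
    (hf : PySem.Chars.find l ['J'] = j) :
    j.toNat < l.length ∧ l[j.toNat]? = some 'J' ∧ 'J' ∉ l.take j.toNat := by
  have hs := PySem.Chars.find_spec (s := l) (sub := ['J']) (by rw [hf]; exact h0)
  rw [hf] at hs
  obtain ⟨h1, h2⟩ := hs
  rw [pv_singleton_prefix, List.head?_drop] at h1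
  refine ⟨?_, h1, ?_⟩
  · rcases List.getElem?_eq_some_iff.mp h1 with ⟨hlt, _⟩; exact hlt
  · intro hmem
    rcases List.mem_take_iff_getElem.mp hmem with ⟨i, hi, hgi⟩
    refine h2 i (lt_of_lt_of_le hi (min_le_left _ _)) ?_
    rw [pv_singleton_prefix, List.head?_drop]
    exact List.getElem?_eq_some_iff.mpr ⟨lt_of_lt_of_le hi (min_le_right _ _), hgi⟩

lemma pv_mem12_slice : ∀ c ∈ PySem.List.slice cardstrength none (some 12), c ≠ 'J' := by
  rw [PySem.List.slice_to _ (by norm_num : (0:Int) ≤ 12)]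
  have ht : List.take (Int.toNat 12) cardstrength
      = ['A', 'K', 'Q', 'T', '9', '8', '7', '6', '5', '4', '3', '2'] := by decide
  rw [ht]
  intro x hx
  simp only [List.mem_cons, List.not_mem_nil, or_false] at hx
  rcases hx with rfl | rfl | rfl | rfl | rfl | rfl | rfl | rfl | rfl | rfl | rfl | rfl <;> decide

lemma pv_count_newhand {l : List Char} {j : Int} (hj : j > -1)
    (hf : PySem.Chars.find l ['J'] = j) {c : Char} (hc : c ≠ 'J') :
    (PySem.List.slice l (some 0) (some j) ++ [c] ++
      PySem.List.slice l (some (j + 1)) (some 5)).count 'J' < l.count 'J' := by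
  have h0 : 0 ≤ j := by omega
  obtain ⟨hlt, hget, hnotin⟩ := pv_find_decomp l h0 hf
  rw [PySem.List.slice_zero_start, PySem.List.slice_to _ h0,
    PySem.List.slice_toNat _ (by omega) (by norm_num)]
  have hj1 : (j + 1).toNat = j.toNat + 1 := by omega
  have h5 : ((5 : Int)).toNat = 5 := rfl
  rw [hj1, h5]
  have hcount0 : List.count 'J' (List.take j.toNat l) = 0 := List.count_eq_zero.mpr hnotin
  have hgv : l[j.toNat] = 'J' := (List.getElem?_eq_some_iff.mp hget).2
  have hdropcons : List.drop j.toNat l = 'J' :: List.drop (j.toNat + 1) l := by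
    rw [List.drop_eq_getElem_cons hlt, hgv]
  have htail : List.count 'J' (List.take (5 - (j.toNat + 1)) (List.drop (j.toNat + 1) l)) ≤
      List.count 'J' (List.drop (j.toNat + 1) l) :=
    (List.take_sublist _ _).count_le _
  have hctotal : List.count 'J' l = 1 + List.count 'J' (List.drop (j.toNat + 1) l) := by
    conv_lhs => rw [← List.take_append_drop j.toNat l]
    rw [List.count_append, hcount0, hdropcons, List.count_cons]
    simp
    omega
  have hcc : List.count 'J' [c] = 0 := by simp [hc]
  rw [List.count_append, List.count_append, hcount0, hcc]
  omega

-- cards = {card: hand.count(card) for card in hand}; len(cards) branch chain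
def classifyA (l : List Char) : Int :=
  let cards := l.foldl (fun d card => d.insert card ((PySem.Chars.count l [card] : Int))) PySem.Dict.empty
  if cards.size = 1 then 6
  else if cards.size = 2 then (if (4 : Int) ∈ cards.values then 5 else 4)
  else if cards.size = 3 then (if (3 : Int) ∈ cards.values then 3 else 2)
  else if cards.size = 4 then 1
  else 0

def handtypeA (l : List Char) (part : Int) : Int :=
  if part = 2 then
    let joker := PySem.Chars.find l ['J']
    if hj : joker > -1 then
      (PySem.List.max? ((PySem.List.slice cardstrength none (some 12)).attach.map
        (fun card => handtypeA
          (PySem.List.slice l (some 0) (some joker) ++ [card.1] ++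
            PySem.List.slice l (some (joker + 1)) (some 5)) 2)) (fun x => x)).getD 0
    else classifyA l
  else classifyA l
termination_by l.count 'J'
decreasing_by
  exact pv_count_newhand hj rfl (pv_mem12_slice _ card.2)

def handtype (hand : String) (part : Int) : Int := handtypeA hand.toList part

-- ===== PORT B =====
-- counts built in one pass; list-indexed branch table
def classifyB (l : List Char) : Int :=
  let counts := l.foldl (fun d ch => d.insert ch (d.getD ch 0 + 1)) PySem.Dict.empty
  let vals := counts.values
  let d := counts.size
  if d = 0 ∨ 5 ≤ d then 0
  else PySem.List.pyGetD
    ([0, 6, if (4 : Int) ∈ vals then 5 else 4, if (3 : Int) ∈ vals then 3 else 2, 1] : List Int)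
    (d : Int) 0

-- if part == 2 and 'J' in hand: max over the 12 non-joker cards of the uniform substitution
def handtypeAltA (l : List Char) (part : Int) : Int :=
  if part = 2 ∧ 'J' ∈ l then
    (PySem.List.max? ((PySem.List.slice cardstrength none (some 12)).map
      (fun c => classifyB (l.map (fun ch => if ch = 'J' then c else ch)))) (fun x => x)).getD 0
  else classifyB l

def handtype_alt (hand : String) (part : Int) : Int := handtypeAltA hand.toList part

-- ===== PRECONDITION & SPEC =====
-- Pre_ excludes part-2 hands longer than five cards that contain a joker: handtype is a
-- 5-card-hand routine and A's hard-coded slice hand[joker+1:5] silently drops the cards after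
-- the fifth while resolving jokers — a truncation artefact on over-long hands, where B scores
-- the whole hand; A returns normally on every input.
def Pre_handtype (hand : String) (part : Int) : Prop :=
  part = 2 → 'J' ∈ hand.toList → hand.toList.length ≤ 5
instance (hand : String) (part : Int) : Decidable (Pre_handtype hand part) := by
  unfold Pre_handtype; infer_instance

def pvWitness_handtype : String × Int := ("AKQJT", 2)

def Spec_handtype (hand : String) (part : Int) (out : Int) : Prop := out = handtype_alt hand part
instance (hand : String) (part : Int) (out : Int) : Decidable (Spec_handtype hand part out) := by unfold Spec_handtype; infer_instance

-- ===== CLAIM (what is proved, stated in full; the proofs are below) =====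
def Claim_equal_handtype : Prop := ∀ (hand : String) (part : Int), Dom_handtype hand part → Pre_handtype hand part → Spec_handtype hand part (handtype hand part)

-- ===== LEMMAS AND PROOFS =====

-- abstract classification value: number of distinct cards, and whether some card occurs 4 / 3 times
def pvG (d : Nat) (p4 p3 : Bool) : Int :=
  if d = 1 then 6 else if d = 2 then (if p4 then 5 else 4)
  else if d = 3 then (if p3 then 3 else 2) else if d = 4 then 1 else 0

def pvD (l : List Char) : Nat := (PySem.Set.ofList l).length

def pvHas (l : List Char) (n : Nat) : Bool := decide (∃ x ∈ l, l.count x = n)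

-- str.count with a single-character needle is element count
lemma pv_count_go (c : Char) (fuel : Nat) (l : List Char) (acc : Nat) (hf : l.length ≤ fuel) :
    PySem.Chars.count.go [c] fuel l acc = acc + l.count c := by
  induction fuel generalizing l acc with
  | zero =>
    have hl : l = [] := by cases l with
      | nil => rfl
      | cons b t => simp at hf
    subst hl; simp [PySem.Chars.count.go]
  | succ n ih =>
    cases l with
    | nil => simp [PySem.Chars.count.go]
    | cons b t =>
      simp only [PySem.Chars.count.go]
      by_cases hbc : c = b
      · subst hbc
        have : [c].isPrefixOf (c :: t) = true := by simp [List.isPrefixOf]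
        rw [if_pos this]
        simp only [List.length_singleton, List.drop_succ_cons, List.drop_zero]
        rw [ih t (acc + 1) (by simpa using Nat.le_of_succ_le_succ (by simpa using hf))]
        simp [List.count_cons]
        omega
      · have hpf : [c].isPrefixOf (b :: t) = false := by
          simp [List.isPrefixOf, hbc]
        rw [if_neg (by simp [hpf])]
        rw [ih t acc (by simpa using hf)]
        have hbc' : ¬ (b = c) := fun h => hbc h.symm
        simp [List.count_cons, hbc']

lemma pv_chars_count_singleton (l : List Char) (c : Char) :
    PySem.Chars.count l [c] = l.count c := by
  have : ([c] : List Char).isEmpty = false := rfl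
  rw [PySem.Chars.count, this]
  simpa using pv_count_go c l.length l 0 le_rfl

lemma pv_get?_foldl_insert_const (l : List Char) (v : Char → Int) (d : PySem.Dict Char Int)
    (k : Char) :
    (l.foldl (fun d c => d.insert c (v c)) d).get? k = if k ∈ l then some (v k) else d.get? k := by
  induction l generalizing d with
  | nil => simp
  | cons b t ih =>
    simp only [List.foldl_cons]
    rw [ih]
    by_cases hk : k ∈ t
    · simp [hk]
    · by_cases hkb : k = b
      · subst hkb; simp [hk, PySem.Dict.get?_insert_self]
      · simp [hk, hkb, PySem.Dict.get?_insert_of_ne _ _ hkb]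

lemma pv_classifyA_eq (l : List Char) : classifyA l = pvG (pvD l) (pvHas l 4) (pvHas l 3) := by
  have hkeys : (l.foldl (fun d card => d.insert card ((PySem.Chars.count l [card] : Int))) PySem.Dict.empty).keys
      = PySem.Set.ofList l := by
    rw [PySem.Dict.keys_foldl_insert]
    rfl
  have hnodup : (l.foldl (fun d card => d.insert card ((PySem.Chars.count l [card] : Int))) PySem.Dict.empty).keys.Nodup := by
    rw [hkeys]; exact PySem.Set.nodup_ofList l
  set dd := l.foldl (fun d card => d.insert card ((PySem.Chars.count l [card] : Int))) PySem.Dict.empty with hdd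
  have hsize : dd.size = pvD l := by
    have h1 : dd.keys.length = dd.size := by
      simp [PySem.Dict.keys, PySem.Dict.size]
    rw [← h1, hkeys]; rfl
  have hval : ∀ n : Nat, n ≠ 0 → (((n : Int) ∈ dd.values) ↔ pvHas l n = true) := by
    intro n _
    simp only [pvHas, decide_eq_true_eq]
    constructor
    · intro hmem
      rcases List.mem_map.mp hmem with ⟨p, hp, hp2⟩
      have hget : dd.get? p.1 = some p.2 := PySem.Dict.get?_of_mem_items dd (by simpa using hp) hnodup
      rw [hdd, pv_get?_foldl_insert_const] at hget
      by_cases hmemL : p.1 ∈ l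
      · rw [if_pos hmemL] at hget
        refine ⟨p.1, hmemL, ?_⟩
        have := Option.some.inj hget
        rw [← this] at hp2
        rw [pv_chars_count_singleton] at hp2
        exact_mod_cast hp2
      · rw [if_neg hmemL] at hget; exact absurd hget (by simp)
    · rintro ⟨x, hx, hcnt⟩
      have hget : dd.get? x = some ((PySem.Chars.count l [x] : Int)) := by
        rw [hdd, pv_get?_foldl_insert_const, if_pos hx]
      have hitem := PySem.Dict.mem_items_of_get?_eq_some dd hget
      have : ((PySem.Chars.count l [x] : Nat) : Int) ∈ dd.values := by
        exact List.mem_map.mpr ⟨(x, ((PySem.Chars.count l [x] : Nat) : Int)), hitem, rfl⟩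
      rw [pv_chars_count_singleton, hcnt] at this
      exact this
  have h4 : ((4 : Int) ∈ dd.values) ↔ pvHas l 4 = true := by
    have := hval 4 (by norm_num); exact_mod_cast this
  have h3 : ((3 : Int) ∈ dd.values) ↔ pvHas l 3 = true := by
    have := hval 3 (by norm_num); exact_mod_cast this
  show (if dd.size = 1 then (6:Int)
    else if dd.size = 2 then (if (4 : Int) ∈ dd.values then 5 else 4)
    else if dd.size = 3 then (if (3 : Int) ∈ dd.values then 3 else 2)
    else if dd.size = 4 then 1 else 0) = pvG (pvD l) (pvHas l 4) (pvHas l 3)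
  rw [hsize]
  simp only [h4, h3]
  unfold pvG
  split_ifs <;> rfl

lemma pv_classifyB_eq (l : List Char) : classifyB l = pvG (pvD l) (pvHas l 4) (pvHas l 3) := by
  show (let counts := l.foldl (fun d ch => d.insert ch (d.getD ch 0 + 1)) PySem.Dict.empty
    let vals := counts.values
    let d := counts.size
    if d = 0 ∨ 5 ≤ d then (0:Int)
    else PySem.List.pyGetD
      ([0, 6, if (4 : Int) ∈ vals then 5 else 4, if (3 : Int) ∈ vals then 3 else 2, 1] : List Int)
      (d : Int) 0) = _
  rw [PySem.Dict.foldl_insert_getD_add_one_eq_counter]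
  have hsize : (PySem.Dict.counter l).size = pvD l := by
    show (PySem.Dict.counter l).items.length = _
    rw [PySem.Dict.items_counter]
    rw [List.length_map]; rfl
  have hvals : (PySem.Dict.counter l).values
      = (PySem.Set.ofList l).map (fun k => ((l.count k : Nat) : Int)) := by
    show ((PySem.Dict.counter l).items).map (fun x => x.2) = _
    rw [PySem.Dict.items_counter, List.map_map]
    rfl
  have hval : ∀ n : Nat, n ≠ 0 → (((n : Int) ∈ (PySem.Dict.counter l).values) ↔ pvHas l n = true) := by
    intro n _
    rw [hvals]
    simp only [pvHas, decide_eq_true_eq, List.mem_map]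
    constructor
    · rintro ⟨k, hk, hkv⟩
      exact ⟨k, (PySem.Set.mem_ofList l k).mp hk, by exact_mod_cast hkv⟩
    · rintro ⟨k, hk, hkv⟩
      exact ⟨k, (PySem.Set.mem_ofList l k).mpr hk, by exact_mod_cast hkv⟩
  simp only [hsize]
  have h4 : ((4 : Int) ∈ (PySem.Dict.counter l).values) ↔ pvHas l 4 = true := by
    have := hval 4 (by norm_num); exact_mod_cast this
  have h3 : ((3 : Int) ∈ (PySem.Dict.counter l).values) ↔ pvHas l 3 = true := by
    have := hval 3 (by norm_num); exact_mod_cast this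
  by_cases e0 : pvD l = 0 ∨ 5 ≤ pvD l
  · rw [if_pos e0]
    unfold pvG
    rcases e0 with e0 | e0
    · simp [e0]
    · have n1 : pvD l ≠ 1 := by omega
      have n2 : pvD l ≠ 2 := by omega
      have n3 : pvD l ≠ 3 := by omega
      have n4 : pvD l ≠ 4 := by omega
      simp [n1, n2, n3, n4]
  · rw [if_neg e0]
    rw [PySem.List.pyGetD_natCast]
    push_neg at e0
    obtain ⟨e1, e2⟩ := e0
    have hd : pvD l = 1 ∨ pvD l = 2 ∨ pvD l = 3 ∨ pvD l = 4 := by omega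
    simp only [h4, h3]
    rcases hd with h | h | h | h <;> rw [h] <;>
      by_cases p4 : pvHas l 4 = true <;> by_cases p3 : pvHas l 3 = true <;>
        simp [p4, p3, pvG, List.getD]

-- max over the 12 non-joker cards
def pvL12 : List Char := ['A', 'K', 'Q', 'T', '9', '8', '7', '6', '5', '4', '3', '2']

set_option maxRecDepth 8192 in
lemma pv_slice12 : PySem.List.slice cardstrength none (some 12) = pvL12 := by
  rw [PySem.List.slice_to _ (by norm_num : (0:Int) ≤ 12)]
  decide

lemma pvL12_ne_J : ∀ x ∈ pvL12, x ≠ 'J' := by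
  intro x hx
  simp only [pvL12, List.mem_cons, List.not_mem_nil, or_false] at hx
  rcases hx with rfl | rfl | rfl | rfl | rfl | rfl | rfl | rfl | rfl | rfl | rfl | rfl <;> decide

def pvMax12 (f : Char → Int) : Int := (PySem.List.max? (pvL12.map f) (fun x => x)).getD 0

lemma pvMax12_eq (f : Char → Int) :
    pvMax12 f = List.foldl max (f 'A')
      (List.map f ['K', 'Q', 'T', '9', '8', '7', '6', '5', '4', '3', '2']) := by
  simp only [pvMax12, pvL12, List.map_cons]
  rw [PySem.List.max?_id_cons]
  rfl

lemma pv_le_pvMax12 (f : Char → Int) {c : Char} (hc : c ∈ pvL12) : f c ≤ pvMax12 f := by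
  rw [pvMax12_eq]
  rcases List.mem_cons.mp hc with rfl | htail
  · exact (PySem.List.le_foldl_max _ _).1
  · exact (PySem.List.le_foldl_max _ _).2 (f c) (List.mem_map_of_mem htail)

lemma pvMax12_le {f : Char → Int} {x : Int} (h : ∀ c ∈ pvL12, f c ≤ x) : pvMax12 f ≤ x := by
  rw [pvMax12_eq]
  rcases PySem.List.foldl_max_mem (List.map f ['K', 'Q', 'T', '9', '8', '7', '6', '5', '4', '3', '2']) (f 'A') with heq | hmem
  · rw [heq]; exact h 'A' (by simp [pvL12])
  · rcases List.mem_map.mp hmem with ⟨c, hcm, hceq⟩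
    rw [← hceq]
    exact h c (List.mem_cons_of_mem _ hcm)

lemma pvMax12_congr {f g : Char → Int} (h : ∀ c ∈ pvL12, f c = g c) : pvMax12 f = pvMax12 g := by
  unfold pvMax12
  rw [List.map_congr_left h]

lemma pvMax12_const (v : Int) : pvMax12 (fun _ => v) = v := by
  apply le_antisymm
  · exact pvMax12_le (fun c _ => le_rfl)
  · exact pv_le_pvMax12 (fun _ => v) (c := 'A') (by simp [pvL12])

-- uniform substitution of all jokers by one card
def pvSub (c : Char) (l : List Char) : List Char := l.map (fun ch => if ch = 'J' then c else ch)

lemma pvSub_append (c : Char) (l₁ l₂ : List Char) :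
    pvSub c (l₁ ++ l₂) = pvSub c l₁ ++ pvSub c l₂ := by simp [pvSub]

lemma pvSub_of_notJ (c : Char) {l : List Char} (h : 'J' ∉ l) : pvSub c l = l := by
  unfold pvSub
  conv_rhs => rw [← List.map_id l]
  apply List.map_congr_left
  intro a ha
  have ha' : a ≠ 'J' := fun he => h (he ▸ ha)
  simp [ha']

lemma length_pvSub (c : Char) (l : List Char) : (pvSub c l).length = l.length := by
  simp [pvSub]

lemma pv_count_pvSub {c : Char} (hc : c ≠ 'J') (l : List Char) (x : Char) :
    (pvSub c l).count x =
      if x = c then l.count c + l.count 'J' else if x = 'J' then 0 else l.count x := by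
  have hJc : ¬ (('J' : Char) = c) := fun h => hc h.symm
  induction l with
  | nil =>
    simp only [pvSub, List.map_nil, List.count_nil]
    split_ifs <;> simp
  | cons b t ih =>
    have hstep : pvSub c (b :: t) = (if b = 'J' then c else b) :: pvSub c t := rfl
    rw [hstep, List.count_cons, ih]
    simp only [List.count_cons, beq_iff_eq]
    by_cases hb : b = 'J'
    · rw [if_pos hb]
      by_cases hx : x = c
      · have h2 : c = x := hx.symm
        rw [if_pos hx, if_pos hx, if_pos h2, if_neg (show ¬ b = c by rw [hb]; exact hJc),
          if_pos hb]
        omega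
      · by_cases hxJ : x = 'J'
        · have hcx : ¬ (c = x) := by rw [hxJ]; exact hc
          rw [if_neg hx, if_neg hx, if_pos hxJ, if_pos hxJ, if_neg hcx]
        · have hcx : ¬ (c = x) := fun h => hx h.symm
          have hbx : ¬ (b = x) := by rw [hb]; exact fun h => hxJ h.symm
          rw [if_neg hx, if_neg hx, if_neg hxJ, if_neg hxJ, if_neg hcx, if_neg hbx]
    · rw [if_neg hb]
      by_cases hx : x = c
      · rw [if_pos hx, if_pos hx, if_neg hb]
        by_cases hbc : b = c
        · have hbx : b = x := by rw [hx]; exact hbc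
          rw [if_pos hbx, if_pos hbc]
          omega
        · have hbx : ¬ (b = x) := by rw [hx]; exact hbc
          rw [if_neg hbx, if_neg hbc]
          omega
      · by_cases hxJ : x = 'J'
        · have hbx : ¬ (b = x) := by rw [hxJ]; exact hb
          rw [if_neg hx, if_neg hx, if_pos hxJ, if_pos hxJ, if_neg hbx]
        · rw [if_neg hx, if_neg hx, if_neg hxJ, if_neg hxJ]

def pvBest (l : List Char) : Int := pvMax12 (fun c => classifyB (pvSub c l))

lemma pv_singleton_infix (a : Char) (l : List Char) : [a] <:+: l ↔ a ∈ l := by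
  constructor
  · intro h; exact List.singleton_sublist.mp h.sublist
  · intro h
    rcases List.append_of_mem h with ⟨s, t, rfl⟩
    exact ⟨s, t, by simp⟩

-- opening lemmas for the two ports at part = 2
lemma pv_attach_map {α β : Type} (l : List α) (g : α → β) :
    l.attach.map (fun c => g c.1) = l.map g := List.attach_map_val

lemma pv_find_neg_notJ {l : List Char} (h : ¬ (PySem.Chars.find l ['J'] > -1)) : 'J' ∉ l := by
  have hge := PySem.Chars.neg_one_le_find l ['J']
  have he : PySem.Chars.find l ['J'] = -1 := by omega
  intro hm
  exact ((PySem.Chars.find_eq_neg_one_iff l ['J']).mp he) ((pv_singleton_infix 'J' l).mpr hm)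

lemma pv_notJ_find {l : List Char} (h : 'J' ∉ l) : PySem.Chars.find l ['J'] = -1 :=
  (PySem.Chars.find_eq_neg_one_iff l ['J']).mpr (fun hinf => h ((pv_singleton_infix 'J' l).mp hinf))

lemma pv_A_noJ {l : List Char} (h : 'J' ∉ l) : handtypeA l 2 = classifyA l := by
  rw [handtypeA]
  simp [pv_notJ_find h]

lemma pv_A_posJ {l : List Char} {j : Int} (hf : PySem.Chars.find l ['J'] = j) (h0 : 0 ≤ j) :
    handtypeA l 2 = pvMax12 (fun c => handtypeA
      (l.take j.toNat ++ [c] ++ (l.drop (j.toNat + 1)).take (5 - (j.toNat + 1))) 2) := by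
  rw [handtypeA]
  simp only [hf, if_true]
  rw [dif_pos (by omega : j > -1)]
  have hmap := pv_attach_map (PySem.List.slice cardstrength none (some 12))
    (fun c => handtypeA
      (PySem.List.slice l (some 0) (some j) ++ [c] ++
        PySem.List.slice l (some (j + 1)) (some 5)) 2)
  rw [hmap]
  rw [pv_slice12]
  rw [PySem.List.slice_zero_start, PySem.List.slice_to _ h0,
    PySem.List.slice_toNat _ (by omega) (by norm_num)]
  have hj1 : (j + 1).toNat = j.toNat + 1 := by omega
  have h5 : ((5 : Int)).toNat = 5 := rfl
  rw [hj1, h5]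
  rfl

-- B at part 2 with a joker present is the best uniform substitution
lemma pv_B_two {l : List Char} (hJ : 'J' ∈ l) : handtypeAltA l 2 = pvBest l := by
  rw [handtypeAltA, if_pos ⟨rfl, hJ⟩, pv_slice12]
  rfl

lemma pv_best_noJ {l : List Char} (h : 'J' ∉ l) : pvBest l = classifyB l := by
  unfold pvBest
  rw [pvMax12_congr (g := fun _ => classifyB l) (fun c _ => by rw [pvSub_of_notJ c h])]
  exact pvMax12_const _

-- canonical-form machinery for the exchange inequality
lemma pv_ofList_replicate (c : Char) (n : Nat) :
    PySem.Set.ofList (List.replicate (n + 1) c) = [c] := by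
  induction n with
  | zero => rfl
  | succ m ih =>
    rw [show List.replicate (m + 2) c = c :: List.replicate (m + 1) c from rfl]
    rw [PySem.Set.ofList_cons, ih]
    have : PySem.Set.discard [c] c = [] := by
      rw [List.eq_nil_iff_forall_not_mem]
      intro a ha
      have := (PySem.Set.mem_discard _ _ _).mp ha
      simp at this
    rw [this]

lemma pv_D_append_rep (L : List Char) (c : Char) (hc : c ∉ L) (p : Nat) :
    pvD (L ++ List.replicate p c) = pvD L + (if p = 0 then 0 else 1) := by
  cases p with
  | zero => simp [pvD]
  | succ n =>
    unfold pvD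
    rw [PySem.Set.ofList_append, PySem.Set.update_eq_append_filter, pv_ofList_replicate]
    have hcon : PySem.Set.contains (PySem.Set.ofList L) c = false := by
      rw [← Bool.not_eq_true]
      intro hcon
      exact hc ((PySem.Set.mem_ofList _ _).mp ((PySem.Set.contains_iff _ _).mp hcon))
    simp [hcon, hc]

lemma pv_has_canon (L : List Char) (c c' : Char) (hc : c ∉ L) (hc' : c' ∉ L) (hcc' : c ≠ c')
    (p q n : Nat) (hn : n ≠ 0) :
    pvHas (L ++ List.replicate p c ++ List.replicate q c') n
      = (pvHas L n || decide (p = n) || decide (q = n)) := by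
  have hc'c : ¬ (c' = c) := fun h => hcc' h.symm
  have hcountc : (L ++ List.replicate p c ++ List.replicate q c').count c = p := by
    rw [List.count_append, List.count_append, List.count_replicate, List.count_replicate]
    rw [List.count_eq_zero.mpr hc]
    simp [hcc', hc'c]
  have hcountc' : (L ++ List.replicate p c ++ List.replicate q c').count c' = q := by
    rw [List.count_append, List.count_append, List.count_replicate, List.count_replicate]
    rw [List.count_eq_zero.mpr hc']
    simp [hcc']
  have hcountx : ∀ x, x ≠ c → x ≠ c' →
      (L ++ List.replicate p c ++ List.replicate q c').count x = L.count x := by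
    intro x hxc hxc'
    have h1 : ¬ (c = x) := fun h => hxc h.symm
    have h2 : ¬ (c' = x) := fun h => hxc' h.symm
    rw [List.count_append, List.count_append, List.count_replicate, List.count_replicate]
    simp [h1, h2]
  unfold pvHas
  rw [← Bool.decide_or, ← Bool.decide_or, decide_eq_decide]
  constructor
  · rintro ⟨x, hxm, hxcnt⟩
    by_cases hxc : x = c
    · subst hxc
      rw [hcountc] at hxcnt
      exact Or.inl (Or.inr hxcnt)
    · by_cases hxc' : x = c'
      · subst hxc'
        rw [hcountc'] at hxcnt
        exact Or.inr hxcnt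
      · rw [hcountx x hxc hxc'] at hxcnt
        rcases List.mem_append.mp hxm with hxm | hxm
        · rcases List.mem_append.mp hxm with hxm | hxm
          · exact Or.inl (Or.inl ⟨x, hxm, hxcnt⟩)
          · exact absurd (List.mem_replicate.mp hxm).2 hxc
        · exact absurd (List.mem_replicate.mp hxm).2 hxc'
  · rintro ((⟨x, hxm, hxcnt⟩ | hp) | hq)
    · have hxc : x ≠ c := fun h => hc (h ▸ hxm)
      have hxc' : x ≠ c' := fun h => hc' (h ▸ hxm)
      exact ⟨x, by simp [hxm], by rw [hcountx x hxc hxc']; exact hxcnt⟩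
    · refine ⟨c, ?_, by rw [hcountc]; exact hp⟩
      have : p ≠ 0 := by omega
      simp [List.mem_replicate, this]
    · refine ⟨c', ?_, by rw [hcountc']; exact hq⟩
      have : q ≠ 0 := by omega
      simp [List.mem_replicate, this]

lemma pv_classifyB_canon (L : List Char) (c c' : Char) (hc : c ∉ L) (hc' : c' ∉ L)
    (hcc' : c ≠ c') (p q : Nat) :
    classifyB (L ++ List.replicate p c ++ List.replicate q c')
      = pvG (pvD L + (if p = 0 then 0 else 1) + (if q = 0 then 0 else 1))
            (pvHas L 4 || decide (p = 4) || decide (q = 4))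
            (pvHas L 3 || decide (p = 3) || decide (q = 3)) := by
  rw [pv_classifyB_eq]
  have hD : pvD (L ++ List.replicate p c ++ List.replicate q c')
      = pvD L + (if p = 0 then 0 else 1) + (if q = 0 then 0 else 1) := by
    have hc'2 : c' ∉ L ++ List.replicate p c := by
      intro hm
      rcases List.mem_append.mp hm with hm | hm
      · exact hc' hm
      · exact hcc' (List.mem_replicate.mp hm).2.symm
    rw [pv_D_append_rep _ _ hc'2, pv_D_append_rep _ _ hc]
  rw [hD, pv_has_canon L c c' hc hc' hcc' p q 4 (by norm_num),
    pv_has_canon L c c' hc hc' hcc' p q 3 (by norm_num)]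

-- permutation invariance
lemma pv_D_perm {l₁ l₂ : List Char} (h : l₁.Perm l₂) : pvD l₁ = pvD l₂ := by
  unfold pvD
  have hperm : (PySem.Set.ofList l₁).Perm (PySem.Set.ofList l₂) := by
    rw [List.perm_ext_iff_of_nodup (PySem.Set.nodup_ofList l₁) (PySem.Set.nodup_ofList l₂)]
    intro a
    rw [PySem.Set.mem_ofList, PySem.Set.mem_ofList]
    exact h.mem_iff
  exact hperm.length_eq

lemma pv_has_perm {l₁ l₂ : List Char} (h : l₁.Perm l₂) (n : Nat) : pvHas l₁ n = pvHas l₂ n := by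
  unfold pvHas
  rw [decide_eq_decide]
  constructor
  · rintro ⟨x, hx, hc⟩; exact ⟨x, h.mem_iff.mp hx, by rw [← h.count_eq]; exact hc⟩
  · rintro ⟨x, hx, hc⟩; exact ⟨x, h.mem_iff.mpr hx, by rw [h.count_eq]; exact hc⟩

lemma pv_classifyB_perm {l₁ l₂ : List Char} (h : l₁.Perm l₂) : classifyB l₁ = classifyB l₂ := by
  rw [pv_classifyB_eq, pv_classifyB_eq, pv_D_perm h, pv_has_perm h 4, pv_has_perm h 3]

lemma pv_count_filter (p : Char → Bool) (l : List Char) (x : Char) :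
    (l.filter p).count x = if p x then l.count x else 0 := by
  by_cases hp : p x = true
  · rw [if_pos hp]; exact List.count_filter hp
  · rw [if_neg hp]
    rw [List.count_eq_zero]
    intro hm
    exact hp (List.of_mem_filter hm)

lemma pv_perm_canon (M : List Char) (c c' : Char) (hcc' : c ≠ c') :
    M.Perm ((M.filter (fun x => !(x == c || x == c'))) ++
      List.replicate (M.count c) c ++ List.replicate (M.count c') c') := by
  rw [List.perm_iff_count]
  intro x
  rw [List.count_append, List.count_append, List.count_replicate, List.count_replicate,
    pv_count_filter]
  by_cases hxc : x = c
  · subst hxc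
    have h1 : ¬ (c' = x) := fun h => hcc' h.symm
    simp [hcc', h1]
  · by_cases hxc' : x = c'
    · subst hxc'
      have h1 : ¬ (x = c) := fun h => hcc' h.symm
      simp [hcc', h1]
    · have h1 : ¬ (c = x) := fun h => hxc h.symm
      have h2 : ¬ (c' = x) := fun h => hxc' h.symm
      simp [hxc, hxc', h1, h2]

lemma pv_count_partition (c c' : Char) (hcc' : c ≠ c') (L : List Char) :
    L.length = (L.filter (fun x => !(x == c || x == c'))).length + L.count c + L.count c' := by
  induction L with
  | nil => simp
  | cons b t ih =>
    rw [List.length_cons, List.count_cons, List.count_cons, List.filter_cons]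
    by_cases hbc : b = c
    · rw [if_neg (by simp [hbc])]
      have e1 : (if (b == c) = true then 1 else 0) = 1 := by simp [hbc]
      have e2 : (if (b == c') = true then 1 else 0) = 0 := by simp [hbc, hcc']
      rw [e1, e2]
      omega
    · by_cases hbc' : b = c'
      · rw [if_neg (by simp [hbc'])]
        have e1 : (if (b == c) = true then 1 else 0) = 0 := by simp [hbc]
        have e2 : (if (b == c') = true then 1 else 0) = 1 := by simp [hbc']
        rw [e1, e2]
        omega
      · rw [if_pos (by simp [hbc, hbc'])]
        rw [List.length_cons]
        have e1 : (if (b == c) = true then 1 else 0) = 0 := by simp [hbc]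
        have e2 : (if (b == c') = true then 1 else 0) = 0 := by simp [hbc']
        rw [e1, e2]
        omega

lemma pv_count_two_le (x y : Char) (hxy : x ≠ y) (L : List Char) :
    L.count x + L.count y ≤ L.length := by
  induction L with
  | nil => simp
  | cons b t ih =>
    rw [List.count_cons, List.count_cons, List.length_cons]
    by_cases hbx : b = x
    · subst hbx
      simp [hxy]
      omega
    · by_cases hby : b = y
      · subst hby
        simp [hbx]
        omega
      · simp [hbx, hby]
        omega

lemma pv_D_le_length (L : List Char) : pvD L ≤ L.length := PySem.Set.length_ofList_le L

lemma pv_D_zero_iff (L : List Char) : pvD L = 0 ↔ L.length = 0 := by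
  constructor
  · intro h
    cases L with
    | nil => rfl
    | cons b t =>
      exfalso
      have : b ∈ PySem.Set.ofList (b :: t) := (PySem.Set.mem_ofList _ _).mpr (by simp)
      have := List.length_pos_of_mem this
      unfold pvD at h
      omega
  · intro h
    rw [List.length_eq_zero_iff] at h
    subst h
    rfl

lemma pv_has_facts {L : List Char} {n : Nat} (hn : 0 < n) (h : pvHas L n = true) :
    n ≤ L.length ∧ 1 ≤ pvD L := by
  rw [pvHas, decide_eq_true_eq] at h
  obtain ⟨x, hx, hc⟩ := h
  constructor
  · rw [← hc]; exact List.count_le_length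
  · have hL : L.length ≠ 0 := by
      intro h0
      rw [List.length_eq_zero_iff] at h0
      subst h0
      simp at hx
    by_cases hz : pvD L = 0
    · exact absurd ((pv_D_zero_iff L).mp hz) hL
    · omega

lemma pv_has_34 {L : List Char} (hlen : L.length ≤ 5) :
    ¬ (pvHas L 3 = true ∧ pvHas L 4 = true) := by
  rintro ⟨h3, h4⟩
  rw [pvHas, decide_eq_true_eq] at h3 h4
  obtain ⟨x, hx, hcx⟩ := h3
  obtain ⟨y, hy, hcy⟩ := h4
  have hxy : x ≠ y := by
    intro he
    rw [he, hcy] at hcx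
    omega
  have := pv_count_two_le x y hxy L
  omega

set_option maxHeartbeats 2000000 in
lemma pv_pure : ∀ r ∈ List.range 6, ∀ s ∈ List.range 6, ∀ a ∈ List.range 6, ∀ b ∈ List.range 6,
    ∀ k ∈ List.range 6, ∀ h4 ∈ [false, true], ∀ h3 ∈ [false, true],
    r ≤ s → (r = 0 ↔ s = 0) → s + a + b + k ≤ 5 → 1 ≤ k →
    (h4 = true → 4 ≤ s ∧ 1 ≤ r) → (h3 = true → 3 ≤ s ∧ 1 ≤ r) → ¬(h3 = true ∧ h4 = true) →
    pvG (r + (if a + 1 = 0 then 0 else 1) + (if b + k - 1 = 0 then 0 else 1))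
        (h4 || decide (a + 1 = 4) || decide (b + k - 1 = 4))
        (h3 || decide (a + 1 = 3) || decide (b + k - 1 = 3)) ≤
      max (pvG (r + (if a = 0 then 0 else 1) + (if b + k = 0 then 0 else 1))
              (h4 || decide (a = 4) || decide (b + k = 4))
              (h3 || decide (a = 3) || decide (b + k = 3)))
          (pvG (r + (if a + k = 0 then 0 else 1) + (if b = 0 then 0 else 1))
              (h4 || decide (a + k = 4) || decide (b = 4))
              (h3 || decide (a + k = 3) || decide (b = 3))) := by
  decide

-- the exchange inequality: assigning the slot joker to c and the remaining jokers to c'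
-- is never better than one of the two uniform assignments
lemma pv_exch (pre suf : List Char) (hpre : 'J' ∉ pre)
    (hlen : pre.length + 1 + suf.length ≤ 5)
    {c c' : Char} (hc : c ∈ pvL12) (hc' : c' ∈ pvL12) :
    classifyB (pre ++ [c] ++ pvSub c' suf) ≤
      max (classifyB (pre ++ [c'] ++ pvSub c' suf)) (classifyB (pre ++ [c] ++ pvSub c suf)) := by
  have hcJ : c ≠ 'J' := pvL12_ne_J c hc
  have hc'J : c' ≠ 'J' := pvL12_ne_J c' hc'
  by_cases hcc' : c = c'
  · subst hcc'
    exact le_max_left _ _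
  have hc'c : ¬ (c' = c) := fun h => hcc' h.symm
  have hcnt : ∀ (e w x : Char), w ≠ 'J' →
      (pre ++ [e] ++ pvSub w suf).count x =
        pre.count x + (if e = x then 1 else 0) +
          (if x = w then suf.count w + suf.count 'J' else if x = 'J' then 0 else suf.count x) := by
    intro e w x hw
    rw [List.count_append, List.count_append, pv_count_pvSub hw]
    have : List.count x [e] = if e = x then 1 else 0 := by
      simp [List.count_singleton']
    rw [this]
  set P : Char → Bool := fun x => !(x == c || x == c') with hP
  have hPc : P c = false := by simp [hP]
  have hPc' : P c' = false := by simp [hP]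
  set M0 := pre ++ [c] ++ pvSub c' suf with hM0
  set M1 := pre ++ [c'] ++ pvSub c' suf with hM1
  set M2 := pre ++ [c] ++ pvSub c suf with hM2
  have hc0 : M0.count c = (pre.count c + suf.count c) + 1 := by
    rw [hM0, hcnt c c' c hc'J]
    simp [hcc', hcJ, hc'c]
    omega
  have hc0' : M0.count c' = (pre.count c' + suf.count c') + suf.count 'J' := by
    rw [hM0, hcnt c c' c' hc'J]
    simp [hcc', hc'c]
    omega
  have hc1 : M1.count c = pre.count c + suf.count c := by
    rw [hM1, hcnt c' c' c hc'J]
    simp [hcc', hcJ, hc'c]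
  have hc1' : M1.count c' = (pre.count c' + suf.count c') + suf.count 'J' + 1 := by
    rw [hM1, hcnt c' c' c' hc'J]
    simp [hcc', hc'c]
    omega
  have hc2 : M2.count c = (pre.count c + suf.count c) + suf.count 'J' + 1 := by
    rw [hM2, hcnt c c c hcJ]
    simp [hcc', hc'c]
    omega
  have hc2' : M2.count c' = pre.count c' + suf.count c' := by
    rw [hM2, hcnt c c c' hcJ]
    simp [hcc', hc'c, hc'J]
  have hcntP : ∀ (e w x : Char), w ≠ 'J' → (w = c ∨ w = c') → (e = c ∨ e = c') → P x = true →
      (pre ++ [e] ++ pvSub w suf).count x =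
        pre.count x + (if x = 'J' then 0 else suf.count x) := by
    intro e w x hw hwcc hecc hPxx
    have hxc : x ≠ c := by
      intro h; rw [h, hPc] at hPxx; exact Bool.false_ne_true hPxx
    have hxc' : x ≠ c' := by
      intro h; rw [h, hPc'] at hPxx; exact Bool.false_ne_true hPxx
    have hxw : x ≠ w := by rcases hwcc with rfl | rfl <;> assumption
    have hxe : e ≠ x := by rcases hecc with rfl | rfl <;> (intro h; exact absurd h.symm (by assumption))
    rw [hcnt e w x hw, if_neg hxe, if_neg hxw]
    omega
  set F0 := M0.filter P with hF0
  set F1 := M1.filter P with hF1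
  set F2 := M2.filter P with hF2
  have hfperm : ∀ (e w : Char), w ≠ 'J' → (w = c ∨ w = c') → (e = c ∨ e = c') →
      F0.Perm ((pre ++ [e] ++ pvSub w suf).filter P) := by
    intro e w hw hwcc hecc
    rw [List.perm_iff_count]
    intro x
    rw [hF0, pv_count_filter, pv_count_filter]
    by_cases hPxx : P x = true
    · rw [if_pos hPxx, if_pos hPxx, hM0, hcntP c c' x hc'J (Or.inr rfl) (Or.inl rfl) hPxx,
        hcntP e w x hw hwcc hecc hPxx]
    · rw [if_neg hPxx, if_neg hPxx]
  have hpermF1 : F0.Perm F1 := hfperm c' c' hc'J (Or.inr rfl) (Or.inr rfl)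
  have hpermF2 : F0.Perm F2 := hfperm c c hcJ (Or.inl rfl) (Or.inl rfl)
  set Ac := pre.count c + suf.count c with hAc
  set Bc := pre.count c' + suf.count c' with hBc
  set K := suf.count 'J' with hK
  have hnotmem : ∀ (F : List Char), F = F0 ∨ F = F1 ∨ F = F2 → c ∉ F ∧ c' ∉ F := by
    intro F hF
    constructor <;> intro hm
    · have : P c = true := by
        rcases hF with rfl | rfl | rfl
        · exact List.of_mem_filter hm
        · exact List.of_mem_filter hm
        · exact List.of_mem_filter hm
      rw [hPc] at this; exact Bool.false_ne_true this
    · have : P c' = true := by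
        rcases hF with rfl | rfl | rfl
        · exact List.of_mem_filter hm
        · exact List.of_mem_filter hm
        · exact List.of_mem_filter hm
      rw [hPc'] at this; exact Bool.false_ne_true this
  obtain ⟨hcF0, hc'F0⟩ := hnotmem F0 (Or.inl rfl)
  obtain ⟨hcF1, hc'F1⟩ := hnotmem F1 (Or.inr (Or.inl rfl))
  obtain ⟨hcF2, hc'F2⟩ := hnotmem F2 (Or.inr (Or.inr rfl))
  have hclass0 : classifyB M0 = pvG (pvD F0 + (if Ac + 1 = 0 then 0 else 1) + (if Bc + K = 0 then 0 else 1))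
      (pvHas F0 4 || decide (Ac + 1 = 4) || decide (Bc + K = 4))
      (pvHas F0 3 || decide (Ac + 1 = 3) || decide (Bc + K = 3)) := by
    rw [pv_classifyB_perm (pv_perm_canon M0 c c' hcc'), ← hF0]
    rw [hc0, hc0', pv_classifyB_canon F0 c c' hcF0 hc'F0 hcc']
  have hclass1 : classifyB M1 = pvG (pvD F0 + (if Ac = 0 then 0 else 1) + (if Bc + K + 1 = 0 then 0 else 1))
      (pvHas F0 4 || decide (Ac = 4) || decide (Bc + K + 1 = 4))
      (pvHas F0 3 || decide (Ac = 3) || decide (Bc + K + 1 = 3)) := by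
    rw [pv_classifyB_perm (pv_perm_canon M1 c c' hcc'), ← hF1]
    rw [hc1, hc1', pv_classifyB_canon F1 c c' hcF1 hc'F1 hcc']
    rw [pv_D_perm hpermF1.symm, pv_has_perm hpermF1.symm 4, pv_has_perm hpermF1.symm 3]
  have hclass2 : classifyB M2 = pvG (pvD F0 + (if Ac + K + 1 = 0 then 0 else 1) + (if Bc = 0 then 0 else 1))
      (pvHas F0 4 || decide (Ac + K + 1 = 4) || decide (Bc = 4))
      (pvHas F0 3 || decide (Ac + K + 1 = 3) || decide (Bc = 3)) := by
    rw [pv_classifyB_perm (pv_perm_canon M2 c c' hcc'), ← hF2]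
    rw [hc2, hc2', pv_classifyB_canon F2 c c' hcF2 hc'F2 hcc']
    rw [pv_D_perm hpermF2.symm, pv_has_perm hpermF2.symm 4, pv_has_perm hpermF2.symm 3]
  have hM0len : M0.length = pre.length + 1 + suf.length := by
    rw [hM0]
    simp [length_pvSub]
    omega
  have hpart : M0.length = F0.length + M0.count c + M0.count c' := by
    rw [hF0, hP]
    exact pv_count_partition c c' hcc' M0
  have hbound : F0.length + Ac + Bc + K + 1 ≤ 5 := by
    rw [hc0, hc0'] at hpart
    omega
  have hrs : pvD F0 ≤ F0.length := pv_D_le_length F0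
  have hr0 : pvD F0 = 0 ↔ F0.length = 0 := pv_D_zero_iff F0
  have hpure := pv_pure (pvD F0) (List.mem_range.mpr (by omega)) F0.length (List.mem_range.mpr (by omega))
    Ac (List.mem_range.mpr (by omega)) Bc (List.mem_range.mpr (by omega))
    (K + 1) (List.mem_range.mpr (by omega))
    (pvHas F0 4) (by cases pvHas F0 4 <;> simp)
    (pvHas F0 3) (by cases pvHas F0 3 <;> simp)
    hrs hr0 (by omega) (by omega)
    (fun h4 => pv_has_facts (by norm_num) h4)
    (fun h3 => pv_has_facts (by norm_num) h3)
    (pv_has_34 (by omega))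
  have e1 : Bc + (K + 1) - 1 = Bc + K := by omega
  have e2 : Bc + (K + 1) = Bc + K + 1 := by omega
  have e3 : Ac + (K + 1) = Ac + K + 1 := by omega
  rw [e1, e2, e3] at hpure
  rw [hclass0, hclass1, hclass2]
  exact hpure

-- the key lemma: maximizing over the first joker's replacement equals the best uniform choice
lemma pv_key (pre suf : List Char) (hpre : 'J' ∉ pre)
    (hlen : pre.length + 1 + suf.length ≤ 5) :
    pvMax12 (fun c => pvBest (pre ++ [c] ++ suf)) = pvBest (pre ++ ['J'] ++ suf) := by
  have hsub : ∀ c' : Char, c' ≠ 'J' → ∀ e : Char, e ≠ 'J' →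
      pvSub c' (pre ++ [e] ++ suf) = pre ++ [e] ++ pvSub c' suf := by
    intro c' hc' e he
    rw [pvSub_append, pvSub_append, pvSub_of_notJ c' hpre]
    congr 2
    simp [pvSub, he]
  have hsubJ : ∀ c' : Char, pvSub c' (pre ++ ['J'] ++ suf) = pre ++ [c'] ++ pvSub c' suf := by
    intro c'
    rw [pvSub_append, pvSub_append, pvSub_of_notJ c' hpre]
    congr 2
  have hRHS : pvBest (pre ++ ['J'] ++ suf)
      = pvMax12 (fun c' => classifyB (pre ++ [c'] ++ pvSub c' suf)) := by
    unfold pvBest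
    exact pvMax12_congr (fun c' _ => by rw [hsubJ c'])
  apply le_antisymm
  · apply pvMax12_le
    intro c hcm
    have hcJ : c ≠ 'J' := pvL12_ne_J c hcm
    have hL : pvBest (pre ++ [c] ++ suf)
        = pvMax12 (fun c' => classifyB (pre ++ [c] ++ pvSub c' suf)) := by
      unfold pvBest
      exact pvMax12_congr (fun c' hc'm => by rw [hsub c' (pvL12_ne_J c' hc'm) c hcJ])
    rw [hL, hRHS]
    apply pvMax12_le
    intro c' hc'm
    refine le_trans (pv_exch pre suf hpre hlen hcm hc'm) (max_le ?_ ?_)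
    · exact pv_le_pvMax12 _ hc'm
    · exact pv_le_pvMax12 _ hcm
  · rw [hRHS]
    apply pvMax12_le
    intro c' hc'm
    have hterm : classifyB (pre ++ [c'] ++ pvSub c' suf) ≤ pvBest (pre ++ [c'] ++ suf) := by
      have hL : pvBest (pre ++ [c'] ++ suf)
          = pvMax12 (fun e => classifyB (pre ++ [c'] ++ pvSub e suf)) := by
        unfold pvBest
        exact pvMax12_congr (fun e hem => by rw [hsub e (pvL12_ne_J e hem) c' (pvL12_ne_J c' hc'm)])
      rw [hL]
      exact pv_le_pvMax12 _ hc'm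
    exact le_trans hterm (pv_le_pvMax12 _ hc'm)

-- A on a hand of at most five cards is the best uniform substitution
lemma pv_A_best : ∀ n (l : List Char), l.count 'J' ≤ n → l.length ≤ 5 →
    handtypeA l 2 = pvBest l := by
  intro n
  induction n with
  | zero =>
    intro l hl _
    have hnot : 'J' ∉ l := by
      intro hm
      have := List.count_pos_iff.mpr hm
      omega
    rw [pv_A_noJ hnot, pv_best_noJ hnot, pv_classifyA_eq, pv_classifyB_eq]
  | succ m ih =>
    intro l hl hlen
    by_cases hj : PySem.Chars.find l ['J'] > -1
    · have h0 : (0:Int) ≤ PySem.Chars.find l ['J'] := by omega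
      obtain ⟨hlt, hget, hnotin⟩ := pv_find_decomp l h0 rfl
      set jn := (PySem.Chars.find l ['J']).toNat with hjn
      have hgv : l[jn] = 'J' := (List.getElem?_eq_some_iff.mp hget).2
      have hdropcons : List.drop jn l = 'J' :: List.drop (jn + 1) l := by
        rw [List.drop_eq_getElem_cons hlt, hgv]
      have hctotal : l.count 'J' = 1 + (l.drop (jn + 1)).count 'J' := by
        conv_lhs => rw [← List.take_append_drop jn l]
        rw [List.count_append, List.count_eq_zero.mpr hnotin, hdropcons, List.count_cons]
        simp
        omega
      rw [pv_A_posJ rfl h0]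
      set pre := l.take jn with hpre
      have hprelen : pre.length = jn := by
        rw [hpre, List.length_take]
        omega
      have hsuf_eq : (l.drop (jn + 1)).take (5 - (jn + 1)) = l.drop (jn + 1) :=
        List.take_of_length_le (by rw [List.length_drop]; omega)
      rw [hsuf_eq]
      set suf := l.drop (jn + 1) with hsuf
      have hsuflen : suf.length = l.length - (jn + 1) := by
        rw [hsuf, List.length_drop]
      have hlen' : pre.length + 1 + suf.length ≤ 5 := by omega
      have hA : pvMax12 (fun c => handtypeA (pre ++ [c] ++ suf) 2)
          = pvMax12 (fun c => pvBest (pre ++ [c] ++ suf)) := by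
        apply pvMax12_congr
        intro c hcm
        have hcJ : c ≠ 'J' := pvL12_ne_J c hcm
        have hcount : (pre ++ [c] ++ suf).count 'J' ≤ m := by
          rw [List.count_append, List.count_append,
            List.count_eq_zero.mpr (by rw [hpre]; exact hnotin)]
          have : List.count 'J' [c] = 0 := by simp [hcJ]
          rw [this]
          omega
        have hclen : (pre ++ [c] ++ suf).length ≤ 5 := by
          simp only [List.length_append, List.length_singleton]
          omega
        exact ih _ hcount hclen
      rw [hA, pv_key pre suf (by rw [hpre]; exact hnotin) hlen']
      congr 1
      rw [List.append_assoc]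
      show l.take jn ++ ('J' :: l.drop (jn + 1)) = l
      rw [← hdropcons]
      exact List.take_append_drop jn l
    · have hnot := pv_find_neg_notJ hj
      rw [pv_A_noJ hnot, pv_best_noJ hnot, pv_classifyA_eq, pv_classifyB_eq]

-- the main equivalence on character lists, inside the precondition
lemma pv_main (l : List Char) (part : Int) (h : part = 2 → 'J' ∈ l → l.length ≤ 5) :
    handtypeA l part = handtypeAltA l part := by
  by_cases hp : part = 2
  · subst hp
    by_cases hJ : 'J' ∈ l
    · rw [pv_A_best (l.count 'J') l le_rfl (h rfl hJ), pv_B_two hJ]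
    · rw [pv_A_noJ hJ, handtypeAltA,
        if_neg (by rintro ⟨-, hm⟩; exact hJ hm), pv_classifyA_eq, pv_classifyB_eq]
  · rw [handtypeA, handtypeAltA, if_neg hp, if_neg (by rintro ⟨h2, -⟩; exact hp h2),
      pv_classifyA_eq, pv_classifyB_eq]

-- ===== VERDICT (by name: the statement is the Claim_ definition above) =====
theorem handtype_spec : Claim_equal_handtype := by
  intro hand part _ hpre
  unfold Pre_handtype at hpre
  unfold Spec_handtype handtype handtype_alt
  exact pv_main hand.toList part hpre
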